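-- pv_equiv track=rewrite | github.com/nathanielmhld/126Project | huffman.py | _s2i_128
-- ===== SOURCE A (Python) =====
-- def _s2i_128(input, i=0, n=-1):
--     """ helper for converting string to integer using ascii starting at position i, using n chars per entity """
--     if n == -1:
--         n = len(input)
--     output = 0
--     for j in range(i, min(i+n, len(input))):
--         output <<= 7
--         char_id = ord(input[j])
--         if char_id < 0 or char_id >= 128:
--             char_id = ord(' ')
--         output += char_id
--     return output
-- ===== SOURCE B (Python) =====
-- def _s2i_128(input, i=0, n=-1):
--     """ helper for converting string to integer using ascii starting at position i, using n chars per entity """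
--     if n == -1:
--         n = len(input)
--     codes = []
--     for j in range(i, min(i + n, len(input))):
--         c = ord(input[j])
--         codes.append(c if 0 <= c < 128 else 32)
--     total = 0
--     weight = 1
--     for code in reversed(codes):
--         total += code * weight
--         weight *= 128
--     return total
-- ===== Notes on version B (the rewrite author's own statement) =====
-- stated objective: alternative
-- what changed: B first materializes the clamped 7-bit codes of the processed slice into a list and then sums code*weight over the reversed list with an explicitly maintained positional base-128 weight, instead of A's single-pass Horner shift-and-add accumulator.
import Mathlib
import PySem

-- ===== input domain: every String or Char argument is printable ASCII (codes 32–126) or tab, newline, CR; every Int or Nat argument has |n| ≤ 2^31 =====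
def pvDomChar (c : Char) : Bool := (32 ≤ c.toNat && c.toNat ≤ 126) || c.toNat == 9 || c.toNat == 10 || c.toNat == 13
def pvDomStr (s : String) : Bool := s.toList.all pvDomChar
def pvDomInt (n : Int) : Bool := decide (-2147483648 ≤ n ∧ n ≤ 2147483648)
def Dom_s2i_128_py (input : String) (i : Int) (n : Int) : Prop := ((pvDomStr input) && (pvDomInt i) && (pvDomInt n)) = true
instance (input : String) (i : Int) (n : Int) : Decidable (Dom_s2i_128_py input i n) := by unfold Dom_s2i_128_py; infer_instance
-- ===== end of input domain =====

-- B replaces A's Horner shift-and-add accumulator by first materializing the clamped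
-- 7-bit codes of the slice and then summing them with explicit positional base-128
-- weights (alternative decomposition, same cost).


-- ===== PORT A =====
def s2i_128_py (input : String) (i : Int) (n : Int) : Int :=
  let len : Int := input.toList.length
  let n : Int := if n = -1 then len else n
  (PySem.List.pyRange i (min (i + n) len) 1).foldl
    (fun output j =>
      let output := output * 128      -- output <<= 7
      match PySem.Str.pyGet? input j with
      | none => output                -- IndexError in Python: excluded by Pre_
      | some ch =>
          let char_id : Int := ch.toNat
          let char_id := if char_id < 0 ∨ 128 ≤ char_id then (32 : Int) else char_id
          output + char_id) 0

-- ===== PORT B =====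
def s2i_128_py_alt (input : String) (i : Int) (n : Int) : Int :=
  let len : Int := input.toList.length
  let n : Int := if n = -1 then len else n
  let codes : List Int := (PySem.List.pyRange i (min (i + n) len) 1).map
    (fun j =>
      match PySem.Str.pyGet? input j with
      | none => 0                     -- IndexError in Python: excluded by Pre_
      | some ch =>
          let c : Int := ch.toNat
          if 0 ≤ c ∧ c < 128 then c else 32)
  (codes.reverse.foldl (fun tw code => (tw.1 + code * tw.2, tw.2 * 128)) ((0 : Int), (1 : Int))).1

-- ===== PRECONDITION & SPEC =====
-- Pre_ excludes exactly the inputs where Python raises IndexError: a nonempty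
-- processed range starting at an index i below -len(input) (both A and B raise there).
def Pre_s2i_128_py (input : String) (i : Int) (n : Int) : Prop :=
  let len : Int := input.toList.length
  let m : Int := if n = -1 then len else n
  i < min (i + m) len → -len ≤ i
instance (input : String) (i : Int) (n : Int) : Decidable (Pre_s2i_128_py input i n) := by
  unfold Pre_s2i_128_py; infer_instance

def pvWitness_s2i_128_py : String × Int × Int := ("ab", 0, -1)

def Spec_s2i_128_py (input : String) (i : Int) (n : Int) (out : Int) : Prop := out = s2i_128_py_alt input i n
instance (input : String) (i : Int) (n : Int) (out : Int) : Decidable (Spec_s2i_128_py input i n out) := by unfold Spec_s2i_128_py; infer_instance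

-- ===== CLAIM (what is proved, stated in full; the proofs are below) =====
def Claim_equal_s2i_128_py : Prop := ∀ (input : String) (i : Int) (n : Int), Dom_s2i_128_py input i n → Pre_s2i_128_py input i n → Spec_s2i_128_py input i n (s2i_128_py input i n)

-- ===== LEMMAS AND PROOFS =====

theorem pvHornerShift (l : List Int) : ∀ a : Int,
    l.foldl (fun o x => o * 128 + x) a
      = a * 128 ^ l.length + l.foldl (fun o x => o * 128 + x) 0 := by
  induction l with
  | nil => intro a; simp
  | cons x xs ih =>
    intro a
    rw [List.foldl_cons, List.foldl_cons, ih (a * 128 + x), ih (0 * 128 + x)]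
    rw [List.length_cons, pow_succ]
    ring

theorem pvRevFold (l : List Int) : ∀ t w : Int,
    l.foldr (fun code tw => (tw.1 + code * tw.2, tw.2 * 128)) (t, w)
      = (t + w * l.foldl (fun o x => o * 128 + x) 0, w * 128 ^ l.length) := by
  induction l with
  | nil => intro t w; simp
  | cons x xs ih =>
    intro t w
    rw [List.foldr_cons, ih t w, List.foldl_cons, pvHornerShift xs (0 * 128 + x)]
    rw [List.length_cons, pow_succ]
    simp only [Prod.mk.injEq]
    constructor <;> ring

-- ===== VERDICT (by name: the statement is the Claim_ definition above) =====
theorem s2i_128_py_spec : Claim_equal_s2i_128_py := by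
  intro input i n _hDom _hPre
  unfold Spec_s2i_128_py s2i_128_py s2i_128_py_alt
  set len : Int := (input.toList.length : Int) with hlen
  set m : Int := if n = -1 then len else n with hm
  set js := PySem.List.pyRange i (min (i + m) len) 1 with hjs
  set codeB : Int → Int := fun j =>
      match PySem.Str.pyGet? input j with
      | none => 0
      | some ch =>
          let c : Int := ch.toNat
          if 0 ≤ c ∧ c < 128 then c else 32
    with hcodeB
  have hbody : (fun (output : Int) (j : Int) =>
      let output := output * 128
      match PySem.Str.pyGet? input j with
      | none => output
      | some ch =>
          let char_id : Int := ch.toNat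
          let char_id := if char_id < 0 ∨ 128 ≤ char_id then (32 : Int) else char_id
          output + char_id)
      = fun (o : Int) (j : Int) => o * 128 + codeB j := by
    funext o j
    rw [hcodeB]
    cases h : PySem.List.pyGet? input.toList j with
    | none => simp [PySem.Str.pyGet?, h]
    | some ch =>
      simp [PySem.Str.pyGet?, h]
      split_ifs <;> omega
  rw [hbody]
  have hmap : js.foldl (fun o j => o * 128 + codeB j) 0
      = (js.map codeB).foldl (fun o x => o * 128 + x) 0 := by
    rw [List.foldl_map]
  rw [hmap]
  show _ = (List.foldl (fun tw code => (tw.1 + code * tw.2, tw.2 * 128)) ((0 : Int), (1 : Int))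
      ((js.map codeB).reverse)).1
  rw [List.foldl_reverse, pvRevFold (js.map codeB) 0 1]
  ring
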